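-- pv_equiv track=rewrite | github.com/orishamir/Calculator | SearchFuncs.py | searchPow
-- ===== SOURCE A (Python) =====
-- def searchPow(expr):
--     parenthesisCounter = 0
--     for i, char in enumerate(expr):
--         if char == "(":
--             parenthesisCounter += 1
--         elif char == ")":
--             parenthesisCounter -= 1
--         elif char == "^" and parenthesisCounter == 0:
--             return i
--     return -1
-- ===== SOURCE B (Python) =====
-- def searchPow(expr):
--     # Entering parenthesis depth before each index (exclusive prefix sums).
--     depths = [0]
--     for c in expr:
--         depths.append(depths[-1] + (1 if c == "(" else -1 if c == ")" else 0))
--     for i, c in enumerate(expr):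
--         if c == "^" and depths[i] == 0:
--             return i
--     return -1
-- ===== Notes on version B (the rewrite author's own statement) =====
-- stated objective: alternative
-- what changed: B first materialises the prefix parenthesis-depth table in one pass, then scans once for the first caret whose entering depth is 0, instead of A's fused single loop updating a counter while it decides.
import Mathlib
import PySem

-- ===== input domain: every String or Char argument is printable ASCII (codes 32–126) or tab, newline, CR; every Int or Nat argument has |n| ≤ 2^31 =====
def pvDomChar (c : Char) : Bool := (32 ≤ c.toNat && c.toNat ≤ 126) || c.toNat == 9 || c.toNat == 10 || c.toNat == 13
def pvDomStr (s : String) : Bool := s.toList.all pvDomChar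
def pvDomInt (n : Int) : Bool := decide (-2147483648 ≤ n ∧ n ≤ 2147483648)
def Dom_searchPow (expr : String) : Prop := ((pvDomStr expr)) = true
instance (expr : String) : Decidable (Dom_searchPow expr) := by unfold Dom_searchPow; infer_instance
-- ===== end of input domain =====

-- B replaces A's fused counter-and-test loop by two passes: build the entering-depth table, then scan for the first top-level caret.

-- ===== PORT A =====
-- A's loop: enumerate with a parenthesis counter, early return on '^' at depth 0.
def searchPowGo : List Char → Int → Int → Int
  | [], _, _ => -1
  | c :: rest, i, pc =>
    if c = '(' then searchPowGo rest (i + 1) (pc + 1)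
    else if c = ')' then searchPowGo rest (i + 1) (pc - 1)
    else if c = '^' ∧ pc = 0 then i
    else searchPowGo rest (i + 1) pc

def searchPow (expr : String) : Int := searchPowGo expr.toList 0 0

-- ===== PORT B =====
def pvDelta (c : Char) : Int := if c = '(' then 1 else if c = ')' then -1 else 0

-- depths[i] = depth entering index i (exclusive prefix sums), as in Source B's first loop
def pvDepths : List Char → Int → List Int
  | [], d => [d]
  | c :: rest, d => d :: pvDepths rest (d + pvDelta c)

-- Source B's second loop over enumerate(expr) paired with the depth table
def pvFind : List (Char × Int) → Int → Int
  | [], _ => -1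
  | (c, d) :: rest, i => if c = '^' ∧ d = 0 then i else pvFind rest (i + 1)

def searchPow_alt (expr : String) : Int :=
  let cs := expr.toList
  pvFind (cs.zip (pvDepths cs 0)) 0

-- ===== PRECONDITION & SPEC =====
def Spec_searchPow (expr : String) (out : Int) : Prop := out = searchPow_alt expr
instance (expr : String) (out : Int) : Decidable (Spec_searchPow expr out) := by unfold Spec_searchPow; infer_instance

-- ===== CLAIM (what is proved, stated in full; the proofs are below) =====
def Claim_equal_searchPow : Prop := ∀ (expr : String), Dom_searchPow expr → Spec_searchPow expr (searchPow expr)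

-- ===== LEMMAS AND PROOFS =====
theorem searchPowGo_eq_find (cs : List Char) (i pc : Int) :
    searchPowGo cs i pc = pvFind (cs.zip (pvDepths cs pc)) i := by
  induction cs generalizing i pc with
  | nil => rfl
  | cons c rest ih =>
    simp only [pvDepths, List.zip, List.zipWith, searchPowGo, pvFind]
    by_cases h1 : c = '('
    · simp [h1, pvDelta, List.zip, sub_eq_add_neg, ih]
    · by_cases h2 : c = ')'
      · simp [h1, h2, pvDelta, List.zip, sub_eq_add_neg, ih]
      · by_cases h3 : c = '^' ∧ pc = 0
        · simp [h1, h2, h3]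
        · by_cases h4 : c = '^'
          · have h5 : ¬ pc = 0 := fun hpc => h3 ⟨h4, hpc⟩
            simp [h1, h2, h3, h4, h5, pvDelta, List.zip, sub_eq_add_neg, ih]
          · simp [h1, h2, h3, h4, pvDelta, List.zip, sub_eq_add_neg, ih]

-- ===== VERDICT (by name: the statement is the Claim_ definition above) =====
theorem searchPow_spec : Claim_equal_searchPow := by
  intro expr _
  unfold Spec_searchPow searchPow searchPow_alt
  exact searchPowGo_eq_find _ 0 0
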